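-- pv_equiv track=rewrite | github.com/Birdacious/Shrimple | Shrimple.py | construct_stroke_2
-- ===== SOURCE A (Python) =====
-- def slices(s, n):
--     if n == 1:
--         yield [s]
--     else:
--         for split in range(1, len(s)):
--             for others in slices(s[split:], n-1):
--                 yield [s[:split]] + others
--
-- def star_positions(parts):
--     for i in range(len(parts)):
--         yield ["*" + s if i == j else s for j, s in enumerate(parts)]
--
-- def construct_stroke_2(target_chord, chord_dictionary, has_asterisk = False):
--     for num_parts in range(1, min(6, len(target_chord)+1)):
--         # When the target chord is made of `num_parts` definitions that are in the dictionary
--         for parts in slices(target_chord, num_parts):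
--             if not has_asterisk:
--                 if all(nth_half in chord_dictionary for nth_half in parts):
--                     return "".join(chord_dictionary[nth_half] for nth_half in parts)
--             else:
--                 for starred_parts in star_positions(parts):
--                     if all(nth_half in chord_dictionary for nth_half in starred_parts):
--                         return "".join(chord_dictionary[nth_half] for nth_half in starred_parts)
--
--     return ""
-- ===== SOURCE B (Python) =====
-- def construct_stroke_2(target_chord, chord_dictionary, has_asterisk = False):
--     d = chord_dictionary
--
--     def can_plain(s, k):
--         # s can be split into exactly k nonempty parts, all of them dictionary keys
--         if k == 1:
--             return s in d
--         return any(s[:m] in d and can_plain(s[m:], k - 1) for m in range(1, len(s)))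
--
--     def can_mixed(s, k):
--         # like can_plain, but exactly one part is a key only once prefixed with '*'
--         if k == 1:
--             return "*" + s in d
--         return any(("*" + s[:m] in d and can_plain(s[m:], k - 1))
--                    or (s[:m] in d and can_mixed(s[m:], k - 1))
--                    for m in range(1, len(s)))
--
--     def build(s, k, ap, am):
--         # lexicographically earliest split of s into k parts that is feasible
--         # under the allowed modes: ap = all-plain allowed, am = one-star allowed
--         if k == 1:
--             return [s]
--         for m in range(1, len(s)):
--             p, rest = s[:m], s[m:]
--             ap2 = (ap and p in d) or (am and "*" + p in d)
--             am2 = am and p in d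
--             if (ap2 and can_plain(rest, k - 1)) or (am2 and can_mixed(rest, k - 1)):
--                 return [p] + build(rest, k - 1, ap2, am2)
--         return [s]  # unreachable when a feasible split exists
--
--     for k in range(1, min(6, len(target_chord) + 1)):
--         if not has_asterisk:
--             if can_plain(target_chord, k):
--                 return "".join(d[p] for p in build(target_chord, k, True, False))
--         else:
--             if can_mixed(target_chord, k):
--                 parts = build(target_chord, k, False, True)
--                 for j in range(len(parts)):
--                     sp = ["*" + p if j == i else p for i, p in enumerate(parts)]
--                     if all(q in d for q in sp):
--                         return "".join(d[q] for q in sp)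
--     return ""
-- ===== Notes on version B (the rewrite author's own statement) =====
-- stated objective: faster
-- what changed: A materializes every <=5-part slicing of the chord (and every star position) and tests each complete candidate; B instead decides feasibility with recursive word-break predicates (all-plain / exactly-one-star) that only recurse where the current prefix is a dictionary key, then greedily reconstructs just the single earliest feasible split and picks the star position on that one partition.
import Mathlib
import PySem

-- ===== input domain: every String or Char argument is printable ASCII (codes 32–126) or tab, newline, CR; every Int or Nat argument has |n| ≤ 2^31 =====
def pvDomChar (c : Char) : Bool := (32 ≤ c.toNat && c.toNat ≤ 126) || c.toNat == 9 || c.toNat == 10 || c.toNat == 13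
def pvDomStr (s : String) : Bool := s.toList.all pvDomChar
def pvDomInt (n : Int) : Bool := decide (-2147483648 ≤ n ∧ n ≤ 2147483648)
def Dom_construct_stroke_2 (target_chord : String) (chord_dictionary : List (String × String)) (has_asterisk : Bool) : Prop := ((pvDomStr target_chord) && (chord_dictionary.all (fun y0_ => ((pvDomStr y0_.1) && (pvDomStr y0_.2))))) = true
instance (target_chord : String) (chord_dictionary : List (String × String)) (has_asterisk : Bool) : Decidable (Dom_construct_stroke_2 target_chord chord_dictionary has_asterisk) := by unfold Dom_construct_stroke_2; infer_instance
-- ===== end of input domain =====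

-- B replaces A's generate-and-test over all ≤5-part slicings by dictionary-feasibility
-- checks plus a greedy earliest-split reconstruction (objective: alternative/faster on
-- inputs with no short answer; equal return value proved below).

-- used by the termination arguments of the recursive port functions
theorem pvSliceLenLt {s : List Char} {i : Int}
    (h : i ∈ PySem.List.pyRange 1 (s.length : Int) 1) :
    (PySem.List.slice s (some i) none).length < s.length := by
  obtain ⟨h1, h2⟩ := PySem.List.mem_pyRange_one.mp h
  rw [PySem.List.slice_from s (by omega)]
  simp only [List.length_drop]
  omega

-- ===== PORT A =====

-- slices(s, n): all splittings of s into n nonempty consecutive parts, in A's order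
def slicesA (s : List Char) (n : Int) : List (List (List Char)) :=
  if n = 1 then [[s]]
  else (PySem.List.pyRange 1 (s.length : Int) 1).attach.flatMap
    (fun m => (slicesA (PySem.List.slice s (some m.1) none) (n - 1)).map
      (fun others => PySem.List.slice s none (some m.1) :: others))
termination_by s.length
decreasing_by exact pvSliceLenLt m.2

-- star_positions(parts)
def starPositionsA (parts : List (List Char)) : List (List (List Char)) :=
  (PySem.List.pyRange 0 (parts.length : Int) 1).map (fun i =>
    (PySem.List.enumerate parts).map (fun js => if i = js.1 then '*' :: js.2 else js.2))

def construct_stroke_2 (target_chord : String) (chord_dictionary : List (String × String)) (has_asterisk : Bool) : String :=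
  let d := PySem.Dict.ofList (chord_dictionary.map (fun p => (p.1.toList, p.2.toList)))
  let t := target_chord.toList
  let r := (PySem.List.pyRange 1 (min 6 ((t.length : Int) + 1)) 1).findSome? (fun num_parts =>
    (slicesA t num_parts).findSome? (fun parts =>
      if !has_asterisk then
        (if parts.all (fun h => d.contains h) then
          some (PySem.Chars.join [] (parts.map (fun h => d.getD h []))) else none)
      else
        (starPositionsA parts).findSome? (fun sp =>
          if sp.all (fun h => d.contains h) then
            some (PySem.Chars.join [] (sp.map (fun h => d.getD h []))) else none)))
  String.ofList (r.getD [])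

-- ===== PORT B =====

-- can_plain(s, k): s splits into exactly k parts, all dictionary keys
def canPlainB (d : PySem.Dict (List Char) (List Char)) (s : List Char) (k : Int) : Bool :=
  if k = 1 then d.contains s
  else (PySem.List.pyRange 1 (s.length : Int) 1).attach.any
    (fun m => d.contains (PySem.List.slice s none (some m.1)) &&
              canPlainB d (PySem.List.slice s (some m.1) none) (k - 1))
termination_by s.length
decreasing_by exact pvSliceLenLt m.2

-- can_mixed(s, k): like can_plain with exactly one part starred
def canMixedB (d : PySem.Dict (List Char) (List Char)) (s : List Char) (k : Int) : Bool :=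
  if k = 1 then d.contains ('*' :: s)
  else (PySem.List.pyRange 1 (s.length : Int) 1).attach.any
    (fun m => (d.contains ('*' :: PySem.List.slice s none (some m.1)) &&
                 canPlainB d (PySem.List.slice s (some m.1) none) (k - 1)) ||
              (d.contains (PySem.List.slice s none (some m.1)) &&
                 canMixedB d (PySem.List.slice s (some m.1) none) (k - 1)))
termination_by s.length
decreasing_by exact pvSliceLenLt m.2

-- build(s, k, ap, am): earliest feasible split under the allowed modes
def buildB (d : PySem.Dict (List Char) (List Char)) (s : List Char) (k : Int) (ap am : Bool) : List (List Char) :=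
  if k = 1 then [s]
  else ((PySem.List.pyRange 1 (s.length : Int) 1).attach.findSome? (fun m =>
      let p := PySem.List.slice s none (some m.1)
      let rest := PySem.List.slice s (some m.1) none
      let ap2 := (ap && d.contains p) || (am && d.contains ('*' :: p))
      let am2 := am && d.contains p
      if (ap2 && canPlainB d rest (k - 1)) || (am2 && canMixedB d rest (k - 1)) then
        some (p :: buildB d rest (k - 1) ap2 am2)
      else none)).getD [s]
termination_by s.length
decreasing_by exact pvSliceLenLt m.2

-- Source B's starred-variants comprehension (one star at position j)
def starVariantsB (parts : List (List Char)) : List (List (List Char)) :=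
  (PySem.List.pyRange 0 (parts.length : Int) 1).map (fun j =>
    (PySem.List.enumerate parts).map (fun ip => if j = ip.1 then '*' :: ip.2 else ip.2))

def construct_stroke_2_alt (target_chord : String) (chord_dictionary : List (String × String)) (has_asterisk : Bool) : String :=
  let d := PySem.Dict.ofList (chord_dictionary.map (fun p => (p.1.toList, p.2.toList)))
  let t := target_chord.toList
  let r := (PySem.List.pyRange 1 (min 6 ((t.length : Int) + 1)) 1).findSome? (fun k =>
    if !has_asterisk then
      (if canPlainB d t k then
        some (PySem.Chars.join [] ((buildB d t k true false).map (fun p => d.getD p []))) else none)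
    else
      (if canMixedB d t k then
        (starVariantsB (buildB d t k false true)).findSome? (fun sp =>
          if sp.all (fun q => d.contains q) then
            some (PySem.Chars.join [] (sp.map (fun q => d.getD q []))) else none)
      else none))
  String.ofList (r.getD [])

-- ===== PRECONDITION & SPEC =====
def Spec_construct_stroke_2 (target_chord : String) (chord_dictionary : List (String × String)) (has_asterisk : Bool) (out : String) : Prop := out = construct_stroke_2_alt target_chord chord_dictionary has_asterisk
instance (target_chord : String) (chord_dictionary : List (String × String)) (has_asterisk : Bool) (out : String) : Decidable (Spec_construct_stroke_2 target_chord chord_dictionary has_asterisk out) := by unfold Spec_construct_stroke_2; infer_instance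

-- ===== CLAIM (what is proved, stated in full; the proofs are below) =====
def Claim_equal_construct_stroke_2 : Prop := ∀ (target_chord : String) (chord_dictionary : List (String × String)) (has_asterisk : Bool), Dom_construct_stroke_2 target_chord chord_dictionary has_asterisk → Spec_construct_stroke_2 target_chord chord_dictionary has_asterisk (construct_stroke_2 target_chord chord_dictionary has_asterisk)

-- ===== LEMMAS AND PROOFS =====

-- abbreviations used only by the proofs
def allC (d : PySem.Dict (List Char) (List Char)) (ps : List (List Char)) : Bool :=
  ps.all (fun h => d.contains h)

def anyC (d : PySem.Dict (List Char) (List Char)) (ps : List (List Char)) : Bool :=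
  (starPositionsA ps).any (allC d)

def predC (d : PySem.Dict (List Char) (List Char)) (ap am : Bool) (ps : List (List Char)) : Bool :=
  (ap && allC d ps) || (am && anyC d ps)

def starCore (i a : Int) (ps : List (List Char)) : List (List Char) :=
  (PySem.List.enumerate ps a).map (fun js => if i = js.1 then '*' :: js.2 else js.2)

theorem starCore_cons (i a : Int) (p : List Char) (t : List (List Char)) :
    starCore i a (p :: t) = (if i = a then '*' :: p else p) :: starCore i (a + 1) t := rfl

theorem starCore_out (i : Int) (t : List (List Char)) :
    ∀ a : Int, i < a → starCore i a t = t := by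
  induction t with
  | nil => intro a _; rfl
  | cons p t ih =>
    intro a h
    rw [starCore_cons, if_neg (by omega), ih (a + 1) (by omega)]

theorem starCore_shift (i c : Int) (t : List (List Char)) :
    ∀ a : Int, starCore (i + c) (a + c) t = starCore i a t := by
  induction t with
  | nil => intro a; rfl
  | cons p t ih =>
    intro a
    rw [starCore_cons, starCore_cons]
    have h1 : (i + c = a + c) = (i = a) := by
      apply propext; omega
    have h2 : starCore (i + c) (a + c + 1) t = starCore i (a + 1) t := by
      have := ih (a + 1); rw [show a + 1 + c = a + c + 1 by ring] at this; exact this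
    rw [h2]
    by_cases hia : i = a
    · rw [if_pos hia, if_pos (by omega)]
    · rw [if_neg hia, if_neg (by omega)]

theorem starPositionsA_eq (parts : List (List Char)) :
    starPositionsA parts = (List.range parts.length).map (fun k : Nat => starCore (k : Int) 0 parts) := by
  unfold starPositionsA
  rw [PySem.List.pyRange_zero_natCast, List.map_map]
  rfl

theorem star_cons (p : List Char) (rest : List (List Char)) :
    starPositionsA (p :: rest) =
      (('*' :: p) :: rest) :: (starPositionsA rest).map (fun sp => p :: sp) := by
  rw [starPositionsA_eq, starPositionsA_eq]
  rw [List.length_cons, List.range_succ_eq_map, List.map_cons, List.map_map, List.map_map]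
  congr 1
  · rw [show starCore ((0 : Nat) : Int) 0 (p :: rest) = starCore 0 0 (p :: rest) by norm_num,
        starCore_cons, if_pos rfl, show (0:Int)+1 = 1 from rfl, starCore_out 0 rest 1 (by omega)]
  · apply List.map_congr_left
    intro k _
    show starCore ((Nat.succ k : Nat) : Int) 0 (p :: rest) = p :: starCore (k : Int) 0 rest
    rw [starCore_cons, if_neg (by push_cast; omega)]
    congr 1
    have := starCore_shift (k : Int) 1 rest 0
    rw [show ((Nat.succ k : Nat) : Int) = (k : Int) + 1 by push_cast; ring]
    rw [show (0 : Int) + 1 = 1 by ring] at this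
    exact this

theorem bool_regroup (ap am cp cs P M : Bool) :
    ((ap && (cp && P)) || (am && ((cs && P) || (cp && M)))) =
      ((((ap && cp) || (am && cs)) && P) || ((am && cp) && M)) := by
  revert ap am cp cs P M; decide

theorem anyC_cons (d : PySem.Dict (List Char) (List Char)) (p : List Char) (rp : List (List Char)) :
    anyC d (p :: rp) =
      ((d.contains ('*' :: p) && allC d rp) || (d.contains p && anyC d rp)) := by
  unfold anyC
  rw [star_cons, List.any_cons, List.any_map]
  have h1 : allC d (('*' :: p) :: rp) = (d.contains ('*' :: p) && allC d rp) := by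
    simp [allC]
  have h2 : rp.length = rp.length := rfl
  rw [h1]
  congr 1
  have : (allC d ∘ fun sp => p :: sp) = (fun sp => d.contains p && allC d sp) := by
    funext sp; simp [allC, Function.comp]
  rw [this]
  cases hc : d.contains p
  · simp
  · simp

theorem pred_cons (d : PySem.Dict (List Char) (List Char)) (ap am : Bool) (p : List Char) (rp : List (List Char)) :
    predC d ap am (p :: rp) =
      predC d ((ap && d.contains p) || (am && d.contains ('*' :: p))) (am && d.contains p) rp := by
  unfold predC
  rw [anyC_cons]
  have h1 : allC d (p :: rp) = (d.contains p && allC d rp) := by simp [allC]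
  rw [h1]
  exact bool_regroup ap am (d.contains p) (d.contains ('*' :: p)) (allC d rp) (anyC d rp)

theorem findSome?_guard {α β : Type} (l : List α) (q : α → Bool) (v : α → β) :
    l.findSome? (fun x => if q x then some (v x) else none) = (l.find? q).map v := by
  induction l with
  | nil => rfl
  | cons a t ih => by_cases h : q a <;> simp [h, ih]

theorem findSome?_eq_bind {α β : Type} (l : List α) (f : α → Option β) :
    l.findSome? f = (l.find? (fun x => (f x).isSome)).bind f := by
  induction l with
  | nil => rfl
  | cons a t ih =>
    cases h : f a <;> simp [h, ih]

theorem findSome?_congr' {α β : Type} (l : List α) (f g : α → Option β)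
    (h : ∀ x ∈ l, f x = g x) : l.findSome? f = l.findSome? g := by
  induction l with
  | nil => rfl
  | cons a t ih =>
    simp only [List.findSome?_cons, h a (by simp)]
    cases g a with
    | some b => rfl
    | none => exact ih (fun x hx => h x (by simp [hx]))

theorem any_distrib {α : Type} (l : List α) (a b : Bool) (f g : α → Bool) :
    ((a && l.any f) || (b && l.any g)) = l.any (fun x => (a && f x) || (b && g x)) := by
  induction l with
  | nil => simp
  | cons x t ih =>
    simp only [List.any_cons, ← ih]
    cases a <;> cases b <;> cases f x <;> cases g x <;> simp

theorem slicesA_one (s : List Char) : slicesA s 1 = [[s]] := by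
  rw [slicesA]; simp

theorem slicesA_ne (s : List Char) (k : Int) (hk : k ≠ 1) :
    slicesA s k = (PySem.List.pyRange 1 (s.length : Int) 1).attach.flatMap
      (fun m => (slicesA (PySem.List.slice s (some m.1) none) (k - 1)).map
        (fun others => PySem.List.slice s none (some m.1) :: others)) := by
  rw [slicesA, if_neg hk]

theorem canPlainB_one (d : PySem.Dict (List Char) (List Char)) (s : List Char) :
    canPlainB d s 1 = d.contains s := by
  rw [canPlainB]; simp

theorem canPlainB_ne (d : PySem.Dict (List Char) (List Char)) (s : List Char) (k : Int) (hk : k ≠ 1) :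
    canPlainB d s k = (PySem.List.pyRange 1 (s.length : Int) 1).attach.any
      (fun m => d.contains (PySem.List.slice s none (some m.1)) &&
                canPlainB d (PySem.List.slice s (some m.1) none) (k - 1)) := by
  rw [canPlainB]; rw [if_neg hk]

theorem canMixedB_one (d : PySem.Dict (List Char) (List Char)) (s : List Char) :
    canMixedB d s 1 = d.contains ('*' :: s) := by
  rw [canMixedB]; simp

theorem canMixedB_ne (d : PySem.Dict (List Char) (List Char)) (s : List Char) (k : Int) (hk : k ≠ 1) :
    canMixedB d s k = (PySem.List.pyRange 1 (s.length : Int) 1).attach.any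
      (fun m => (d.contains ('*' :: PySem.List.slice s none (some m.1)) &&
                   canPlainB d (PySem.List.slice s (some m.1) none) (k - 1)) ||
                (d.contains (PySem.List.slice s none (some m.1)) &&
                   canMixedB d (PySem.List.slice s (some m.1) none) (k - 1))) := by
  rw [canMixedB]; rw [if_neg hk]

theorem buildB_one (d : PySem.Dict (List Char) (List Char)) (s : List Char) (ap am : Bool) :
    buildB d s 1 ap am = [s] := by
  rw [buildB]; simp

theorem buildB_ne (d : PySem.Dict (List Char) (List Char)) (s : List Char) (k : Int) (ap am : Bool) (hk : k ≠ 1) :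
    buildB d s k ap am = ((PySem.List.pyRange 1 (s.length : Int) 1).attach.findSome? (fun m =>
      if (((ap && d.contains (PySem.List.slice s none (some m.1))) ||
           (am && d.contains ('*' :: PySem.List.slice s none (some m.1)))) &&
            canPlainB d (PySem.List.slice s (some m.1) none) (k - 1)) ||
         ((am && d.contains (PySem.List.slice s none (some m.1))) &&
            canMixedB d (PySem.List.slice s (some m.1) none) (k - 1)) then
        some (PySem.List.slice s none (some m.1) ::
          buildB d (PySem.List.slice s (some m.1) none) (k - 1)
            ((ap && d.contains (PySem.List.slice s none (some m.1))) ||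
             (am && d.contains ('*' :: PySem.List.slice s none (some m.1))))
            (am && d.contains (PySem.List.slice s none (some m.1))))
      else none)).getD [s] := by
  rw [buildB]; rw [if_neg hk]

-- main lemma: A's first acceptable partition is exactly B's greedy reconstruction
theorem mainM (d : PySem.Dict (List Char) (List Char)) (s : List Char) (k : Int) (ap am : Bool) :
    (slicesA s k).find? (predC d ap am) =
      if (ap && canPlainB d s k) || (am && canMixedB d s k) then
        some (buildB d s k ap am) else none := by
  by_cases hk : k = 1
  · subst hk
    rw [slicesA_one, canPlainB_one, canMixedB_one, buildB_one]
    have hp : predC d ap am [s] = ((ap && d.contains s) || (am && d.contains ('*' :: s))) := by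
      unfold predC
      have h1 : allC d [s] = d.contains s := by simp [allC]
      have h2 : anyC d [s] = d.contains ('*' :: s) := by
        unfold anyC
        rw [star_cons]
        have : starPositionsA ([] : List (List Char)) = [] := rfl
        rw [this]
        simp [allC]
      rw [h1, h2]
    rw [show ([[s]] : List (List (List Char))).find? (predC d ap am) =
          (if predC d ap am [s] then some [s] else none) from by
        rw [List.find?_cons]; cases h : predC d ap am [s] <;> simp]
    rw [hp]
  · rw [slicesA_ne s k hk, List.find?_flatMap]
    rw [findSome?_congr' _ _ (fun m =>
      if (((ap && d.contains (PySem.List.slice s none (some m.1))) ||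
           (am && d.contains ('*' :: PySem.List.slice s none (some m.1)))) &&
            canPlainB d (PySem.List.slice s (some m.1) none) (k - 1)) ||
         ((am && d.contains (PySem.List.slice s none (some m.1))) &&
            canMixedB d (PySem.List.slice s (some m.1) none) (k - 1)) then
        some (PySem.List.slice s none (some m.1) ::
          buildB d (PySem.List.slice s (some m.1) none) (k - 1)
            ((ap && d.contains (PySem.List.slice s none (some m.1))) ||
             (am && d.contains ('*' :: PySem.List.slice s none (some m.1))))
            (am && d.contains (PySem.List.slice s none (some m.1))))
      else none)
      (fun m _ => by
        rw [List.find?_map]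
        have hcomp : (predC d ap am ∘ fun others => PySem.List.slice s none (some m.1) :: others) =
            predC d ((ap && d.contains (PySem.List.slice s none (some m.1))) ||
                     (am && d.contains ('*' :: PySem.List.slice s none (some m.1))))
                    (am && d.contains (PySem.List.slice s none (some m.1))) := by
          funext rp
          exact pred_cons d ap am (PySem.List.slice s none (some m.1)) rp
        rw [hcomp, mainM d (PySem.List.slice s (some m.1) none) (k - 1)
              ((ap && d.contains (PySem.List.slice s none (some m.1))) ||
               (am && d.contains ('*' :: PySem.List.slice s none (some m.1))))
              (am && d.contains (PySem.List.slice s none (some m.1)))]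
        cases hc : (((ap && d.contains (PySem.List.slice s none (some m.1))) ||
           (am && d.contains ('*' :: PySem.List.slice s none (some m.1)))) &&
            canPlainB d (PySem.List.slice s (some m.1) none) (k - 1)) ||
         ((am && d.contains (PySem.List.slice s none (some m.1))) &&
            canMixedB d (PySem.List.slice s (some m.1) none) (k - 1)) <;>
          simp only [hc] <;> simp)]
    rw [canPlainB_ne d s k hk, canMixedB_ne d s k hk, buildB_ne d s k ap am hk]
    rw [any_distrib]
    simp only [bool_regroup]
    rw [findSome?_guard]
    cases hf : (PySem.List.pyRange 1 (s.length : Int) 1).attach.find? (fun m =>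
      (((ap && d.contains (PySem.List.slice s none (some m.1))) ||
           (am && d.contains ('*' :: PySem.List.slice s none (some m.1)))) &&
            canPlainB d (PySem.List.slice s (some m.1) none) (k - 1)) ||
         ((am && d.contains (PySem.List.slice s none (some m.1))) &&
            canMixedB d (PySem.List.slice s (some m.1) none) (k - 1))) with
    | none =>
      rw [if_neg ?_]
      · rfl
      · intro hany
        obtain ⟨x, hx, hpx⟩ := List.any_eq_true.mp hany
        exact absurd hpx (by simpa using List.find?_eq_none.mp hf x hx)
    | some a =>
      rw [if_pos ?_]
      · rfl
      · have hmem := List.mem_of_find?_eq_some hf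
        have hpa := List.find?_some hf
        exact List.any_eq_true.mpr ⟨a, hmem, hpa⟩
termination_by s.length
decreasing_by exact pvSliceLenLt m.2

theorem find?_isSome_any {α : Type} (l : List α) (q : α → Bool) :
    (l.find? q).isSome = l.any q := by
  induction l with
  | nil => rfl
  | cons a t ih => cases h : q a <;> simp [h, ih]

theorem perK_plain (d : PySem.Dict (List Char) (List Char)) (t : List Char) (k : Int) :
    (slicesA t k).findSome? (fun parts =>
        if parts.all (fun h => d.contains h) then
          some (PySem.Chars.join [] (parts.map (fun h => d.getD h []))) else none) =
      if canPlainB d t k then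
        some (PySem.Chars.join [] ((buildB d t k true false).map (fun p => d.getD p []))) else none := by
  rw [findSome?_eq_bind]
  have hpred : (fun parts : List (List Char) =>
      (if parts.all (fun h => d.contains h) then
        some (PySem.Chars.join [] (parts.map (fun h => d.getD h []))) else none).isSome) =
      predC d true false := by
    funext parts
    cases h : parts.all (fun h => d.contains h) <;> simp [h, predC, allC]
  rw [hpred, mainM d t k true false]
  rw [show (true && canPlainB d t k || false && canMixedB d t k) = canPlainB d t k by simp]
  cases hcp : canPlainB d t k
  · simp
  · have hfind : (slicesA t k).find? (predC d true false) = some (buildB d t k true false) := by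
      rw [mainM d t k true false]
      rw [show (true && canPlainB d t k || false && canMixedB d t k) = canPlainB d t k by simp]
      simp [hcp]
    have hall := List.find?_some hfind
    simp only [predC, allC] at hall
    simp at hall
    have hallb : (buildB d t k true false).all (fun h => d.contains h) = true :=
      List.all_eq_true.mpr hall
    simp
    exact hall

theorem perK_star (d : PySem.Dict (List Char) (List Char)) (t : List Char) (k : Int) :
    (slicesA t k).findSome? (fun parts =>
        (starPositionsA parts).findSome? (fun sp =>
          if sp.all (fun h => d.contains h) then
            some (PySem.Chars.join [] (sp.map (fun h => d.getD h []))) else none)) =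
      if canMixedB d t k then
        (starVariantsB (buildB d t k false true)).findSome? (fun sp =>
          if sp.all (fun q => d.contains q) then
            some (PySem.Chars.join [] (sp.map (fun q => d.getD q []))) else none)
      else none := by
  rw [findSome?_eq_bind]
  have hpred : (fun parts : List (List Char) =>
      ((starPositionsA parts).findSome? (fun sp =>
          if sp.all (fun h => d.contains h) then
            some (PySem.Chars.join [] (sp.map (fun h => d.getD h []))) else none)).isSome) =
      predC d false true := by
    funext parts
    rw [findSome?_guard]
    simp only [Option.isSome_map, find?_isSome_any]
    simp only [predC, anyC]
    simp
    rfl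
  rw [hpred, mainM d t k false true]
  rw [show (false && canPlainB d t k || true && canMixedB d t k) = canMixedB d t k by simp]
  cases hcm : canMixedB d t k
  · simp
  · rw [show starVariantsB = starPositionsA from rfl]
    simp

-- ===== VERDICT (by name: the statement is the Claim_ definition above) =====
theorem construct_stroke_2_spec : Claim_equal_construct_stroke_2 := by
  intro tc cd ha _
  unfold Spec_construct_stroke_2
  cases ha
  · simp only [construct_stroke_2, construct_stroke_2_alt, Bool.not_false, if_true]
    refine congrArg (fun r : Option (List Char) => String.ofList (r.getD [])) ?_
    apply findSome?_congr'
    intro k _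
    exact perK_plain _ _ k
  · simp only [construct_stroke_2, construct_stroke_2_alt, Bool.not_true]
    refine congrArg (fun r : Option (List Char) => String.ofList (r.getD [])) ?_
    apply findSome?_congr'
    intro k _
    exact perK_star _ _ k
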